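-- pv_equiv track=rewrite | github.com/neozenith/swift-analysis | scripts/fetch_lyrics_for_tracks.py | clean_lyrics_text
-- ===== SOURCE A (Python) =====
-- def clean_lyrics_text(lyrics: str, title: str) -> str:
--     """Remove metadata cruft from fetched lyrics.
--
--     Filters out:
--     - Contributor count lines
--     - Translation language lists
--     - Song title with 'Lyrics' suffix
--     - Background information paragraphs
--     - 'Read More' links
--     """
--     lines = lyrics.split('\n')
--     cleaned_lines = []
--     skip_metadata = True
--
--     # Common language names to filter
--     languages = {
--         'Türkçe', 'Español', 'Français', 'Deutsch', 'Italiano',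
--         'Português', 'Polski', 'Svenska', 'Afrikaans', 'srpski',
--         'Українська', 'Беларуская', 'Slovenščina', '日本語', '中文',
--         'Русский', 'العربية', 'हिन्दी', 'Nederlands', 'Norsk'
--     }
--
--     for line in lines:
--         line_stripped = line.strip()
--
--         # Skip empty lines at the beginning
--         if skip_metadata and not line_stripped:
--             continue
--
--         # Skip contributor lines
--         if 'Contributors' in line_stripped or 'Contributor' in line_stripped:
--             continue
--
--         # Skip "Translations" header
--         if line_stripped == 'Translations':
--             continue
--
--         # Skip language names
--         if line_stripped in languages:
--             continue
--
--         # Skip the "Song Title Lyrics" line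
--         if line_stripped.endswith(' Lyrics') and title in line_stripped:
--             continue
--
--         # Skip "Read More" lines
--         if line_stripped == 'Read More':
--             continue
--
--         # Detect start of actual lyrics - usually starts with [Verse, [Chorus, [Intro, etc
--         # or starts with quotes or regular text that's not metadata
--         if skip_metadata and (
--             line_stripped.startswith('[') or
--             line_stripped.startswith('"') or
--             (line_stripped and not any(x in line_stripped for x in ['Contributors', 'Translations', 'Lyrics']))
--         ):
--             # Check if this might be background info (usually longer sentences)
--             # Background info typically contains "wrote", "was", "dating", etc.
--             background_indicators = [
--                 'wrote', 'was', 'were', 'dated', 'dating', 'recorded',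
--                 'released', 'produced', 'inspired', 'about', 'song is',
--                 'track is', 'single', 'album', 'This song', 'The song'
--             ]
--
--             if len(line_stripped) > 100 and any(indicator in line_stripped.lower() for indicator in background_indicators):
--                 continue
--
--             skip_metadata = False
--
--         # Once we're past metadata, include all lines
--         if not skip_metadata:
--             cleaned_lines.append(line)
--
--     return '\n'.join(cleaned_lines).strip()
-- ===== SOURCE B (Python) =====
-- def clean_lyrics_text(lyrics: str, title: str) -> str:
--     """Two-phase rewrite: find the first real-lyrics line, then filter the tail."""
--     languages = {
--         'Türkçe', 'Español', 'Français', 'Deutsch', 'Italiano',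
--         'Português', 'Polski', 'Svenska', 'Afrikaans', 'srpski',
--         'Українська', 'Беларуская', 'Slovenščina', '日本語', '中文',
--         'Русский', 'العربية', 'हिन्दी', 'Nederlands', 'Norsk'
--     }
--     background_indicators = [
--         'wrote', 'was', 'were', 'dated', 'dating', 'recorded',
--         'released', 'produced', 'inspired', 'about', 'song is',
--         'track is', 'single', 'album', 'This song', 'The song'
--     ]
--
--     def is_skip(ls):
--         return ('Contributors' in ls or 'Contributor' in ls
--                 or ls == 'Translations'
--                 or ls in languages
--                 or (ls.endswith(' Lyrics') and title in ls)
--                 or ls == 'Read More')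
--
--     def is_start(ls):
--         if not ls or is_skip(ls):
--             return False
--         if not (ls.startswith('[') or ls.startswith('"')
--                 or (ls and not any(x in ls for x in ['Contributors', 'Translations', 'Lyrics']))):
--             return False
--         if len(ls) > 100 and any(ind in ls.lower() for ind in background_indicators):
--             return False
--         return True
--
--     lines = lyrics.split('\n')
--     start = next((i for i, line in enumerate(lines) if is_start(line.strip())), None)
--     if start is None:
--         return ''
--     kept = [line for line in lines[start:] if not is_skip(line.strip())]
--     return '\n'.join(kept).strip()
-- ===== Notes on version B (the rewrite author's own statement) =====
-- stated objective: alternative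
-- what changed: Replaces A's single-pass boolean state machine with a two-phase decomposition: first locate the index of the first real-lyrics line with a findIdx scan, then filter the metadata lines out of the tail from that index and join.
import Mathlib
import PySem

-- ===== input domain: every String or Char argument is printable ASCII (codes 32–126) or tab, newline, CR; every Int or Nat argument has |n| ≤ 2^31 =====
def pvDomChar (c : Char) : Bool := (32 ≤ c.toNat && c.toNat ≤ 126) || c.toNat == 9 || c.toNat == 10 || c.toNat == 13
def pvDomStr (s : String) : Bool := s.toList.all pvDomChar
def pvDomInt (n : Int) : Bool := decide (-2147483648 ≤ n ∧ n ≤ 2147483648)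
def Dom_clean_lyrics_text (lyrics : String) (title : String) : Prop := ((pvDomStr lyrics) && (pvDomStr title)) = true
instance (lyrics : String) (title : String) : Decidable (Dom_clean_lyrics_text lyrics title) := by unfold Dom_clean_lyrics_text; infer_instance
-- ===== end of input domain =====

-- B splits A's one-pass state machine into two phases (find the first real-lyrics line, then filter the tail): alternative decomposition, same cost.


-- ===== PORT A =====
-- the `languages` set literal (only membership is used) and the background-indicator list, shared literals of both Pythons
def pvLanguages : List String :=
  ["Türkçe", "Español", "Français", "Deutsch", "Italiano",
   "Português", "Polski", "Svenska", "Afrikaans", "srpski",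
   "Українська", "Беларуская", "Slovenščina", "日本語", "中文",
   "Русский", "العربية", "हिन्दी", "Nederlands", "Norsk"]

def pvIndicators : List String :=
  ["wrote", "was", "were", "dated", "dating", "recorded",
   "released", "produced", "inspired", "about", "song is",
   "track is", "single", "album", "This song", "The song"]

-- A's for-loop, step for step: state = (skip_metadata, cleaned_lines)
def pvALoop (title : String) : List String → Bool → List String → List String
  | [], _, acc => acc
  | l :: ls, skip, acc =>
    let st := PySem.Str.strip l
    if skip && (st == "") then pvALoop title ls skip acc
    else if PySem.Str.isIn "Contributors" st || PySem.Str.isIn "Contributor" st then pvALoop title ls skip acc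
    else if st == "Translations" then pvALoop title ls skip acc
    else if pvLanguages.contains st then pvALoop title ls skip acc
    else if PySem.Str.endswith st " Lyrics" && PySem.Str.isIn title st then pvALoop title ls skip acc
    else if st == "Read More" then pvALoop title ls skip acc
    else if skip && (PySem.Str.startswith st "[" || PySem.Str.startswith st "\"" ||
        (!(st == "") && !(["Contributors", "Translations", "Lyrics"].any (fun x => PySem.Str.isIn x st)))) then
      if decide (PySem.Str.len st > 100) && pvIndicators.any (fun ind => PySem.Str.isIn ind (PySem.Str.lower st)) then
        pvALoop title ls skip acc
      else
        -- skip_metadata = False; the `if not skip_metadata` then appends the line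
        pvALoop title ls false (acc ++ [l])
    else if !skip then pvALoop title ls skip (acc ++ [l])
    else pvALoop title ls skip acc

def clean_lyrics_text (lyrics : String) (title : String) : String :=
  PySem.Str.strip (PySem.Str.join "\n"
    (pvALoop title ((PySem.Str.split? lyrics "\n").getD []) true []))

-- ===== PORT B =====
def pvIsSkip (title : String) (st : String) : Bool :=
  PySem.Str.isIn "Contributors" st || PySem.Str.isIn "Contributor" st ||
  (st == "Translations") || pvLanguages.contains st ||
  (PySem.Str.endswith st " Lyrics" && PySem.Str.isIn title st) ||
  (st == "Read More")

def pvIsStart (title : String) (st : String) : Bool :=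
  if (st == "") || pvIsSkip title st then false
  else if !(PySem.Str.startswith st "[" || PySem.Str.startswith st "\"" ||
      (!(st == "") && !(["Contributors", "Translations", "Lyrics"].any (fun x => PySem.Str.isIn x st)))) then false
  else if decide (PySem.Str.len st > 100) && pvIndicators.any (fun ind => PySem.Str.isIn ind (PySem.Str.lower st)) then false
  else true

def clean_lyrics_text_alt (lyrics : String) (title : String) : String :=
  match ((PySem.Str.split? lyrics "\n").getD []).findIdx? (fun l => pvIsStart title (PySem.Str.strip l)) with
  | none => ""
  | some i =>
    PySem.Str.strip (PySem.Str.join "\n"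
      ((((PySem.Str.split? lyrics "\n").getD []).drop i).filter (fun l => !pvIsSkip title (PySem.Str.strip l))))

-- ===== PRECONDITION & SPEC =====
def Spec_clean_lyrics_text (lyrics : String) (title : String) (out : String) : Prop := out = clean_lyrics_text_alt lyrics title
instance (lyrics : String) (title : String) (out : String) : Decidable (Spec_clean_lyrics_text lyrics title out) := by unfold Spec_clean_lyrics_text; infer_instance

-- ===== CLAIM (what is proved, stated in full; the proofs are below) =====
def Claim_equal_clean_lyrics_text : Prop := ∀ (lyrics : String) (title : String), Dom_clean_lyrics_text lyrics title → Spec_clean_lyrics_text lyrics title (clean_lyrics_text lyrics title)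

-- ===== LEMMAS AND PROOFS =====

-- an if-chain whose first six branches agree collapses to one test (abstract Booleans)
theorem pv_ite_chain_false {A : Type} (a1 a2 c2 c3 c4 c5 : Bool) (X Y : A) :
    (if a1 || a2 then X else if c2 then X else if c3 then X else if c4 then X else
     if c5 then X else Y)
    = if a1 || a2 || c2 || c3 || c4 || c5 then X else Y := by
  cases a1 <;> cases a2 <;> cases c2 <;> cases c3 <;> cases c4 <;> cases c5 <;> rfl

-- the same collapse for A's flag-up step, exposing the start condition (abstract Booleans)
theorem pv_ite_chain_true {A : Type} (e a1 a2 c2 c3 c4 c5 d bg : Bool) (X Y : A) :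
    (if e then X else if a1 || a2 then X else if c2 then X else if c3 then X else
     if c4 then X else if c5 then X else if d then (if bg then X else Y) else X)
    = if !e && (!(a1 || a2 || c2 || c3 || c4 || c5) && (d && !bg)) then Y else X := by
  cases e <;> cases a1 <;> cases a2 <;> cases c2 <;> cases c3 <;> cases c4 <;> cases c5 <;>
    cases d <;> cases bg <;> rfl

-- pvIsStart, written as one Boolean conjunction (abstract-Boolean computation)
theorem pv_isStart_aux : ∀ (e k d bg : Bool),
    (if e || k then false else if !d then false else if bg then false else true)
    = (!e && (!k && (d && !bg))) := by decide

theorem pvIsStart_eq (title st : String) :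
    pvIsStart title st =
      (!(st == "") && (!(pvIsSkip title st) &&
        ((PySem.Str.startswith st "[" || PySem.Str.startswith st "\"" ||
          (!(st == "") && !(["Contributors", "Translations", "Lyrics"].any (fun x => PySem.Str.isIn x st)))) &&
         !(decide (PySem.Str.len st > 100) &&
           pvIndicators.any (fun ind => PySem.Str.isIn ind (PySem.Str.lower st)))))) :=
  pv_isStart_aux (st == "") (pvIsSkip title st)
    (PySem.Str.startswith st "[" || PySem.Str.startswith st "\"" ||
      (!(st == "") && !(["Contributors", "Translations", "Lyrics"].any (fun x => PySem.Str.isIn x st))))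
    (decide (PySem.Str.len st > 100) &&
      pvIndicators.any (fun ind => PySem.Str.isIn ind (PySem.Str.lower st)))

-- one step of A's loop with the flag down: the line is kept unless a skip filter matches
theorem pvALoop_cons_false (title l : String) (ls acc : List String) :
    pvALoop title (l :: ls) false acc =
      if pvIsSkip title (PySem.Str.strip l) then pvALoop title ls false acc
      else pvALoop title ls false (acc ++ [l]) := by
  simp only [pvALoop, Bool.false_and, Bool.not_false, Bool.false_eq_true, if_false,
    if_true]
  rw [pv_ite_chain_false]
  rfl

-- one step of A's loop with the flag up: drop the line unless it starts the lyrics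
theorem pvALoop_cons_true (title l : String) (ls acc : List String) :
    pvALoop title (l :: ls) true acc =
      if pvIsStart title (PySem.Str.strip l) then pvALoop title ls false (acc ++ [l])
      else pvALoop title ls true acc := by
  simp only [pvALoop, Bool.true_and, Bool.not_true, Bool.false_eq_true, if_false]
  rw [pv_ite_chain_true, pvIsStart_eq]
  simp only [pvIsSkip]
  exact ite_congr rfl (fun _ => rfl) (fun _ => rfl)

-- once the flag is down, A's loop is a plain filter
theorem pvALoop_false (title : String) (ls : List String) (acc : List String) :
    pvALoop title ls false acc = acc ++ ls.filter (fun l => !pvIsSkip title (PySem.Str.strip l)) := by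
  induction ls generalizing acc with
  | nil => simp [pvALoop]
  | cons l ls ih =>
    rw [pvALoop_cons_false, List.filter_cons]
    by_cases hk : pvIsSkip title (PySem.Str.strip l) <;> simp [hk, ih]

-- with the flag up, A's loop is: find the start line, then filter from there
theorem pvALoop_true (title : String) (ls : List String) (acc : List String) :
    pvALoop title ls true acc =
      acc ++ (match ls.findIdx? (fun l => pvIsStart title (PySem.Str.strip l)) with
              | none => []
              | some i => (ls.drop i).filter (fun l => !pvIsSkip title (PySem.Str.strip l))) := by
  induction ls generalizing acc with
  | nil => simp [pvALoop]
  | cons l ls ih =>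
    rw [pvALoop_cons_true, List.findIdx?_cons]
    by_cases hs : pvIsStart title (PySem.Str.strip l)
    · have hk : pvIsSkip title (PySem.Str.strip l) = false := by
        have h := hs
        rw [pvIsStart_eq] at h
        simp only [Bool.and_eq_true, Bool.not_eq_true'] at h
        exact h.2.1
      rw [if_pos hs, pvALoop_false]
      simp [hs, hk]
    · rw [if_neg hs, ih]
      simp only [hs, Bool.false_eq_true, if_false]
      cases ls.findIdx? (fun l => pvIsStart title (PySem.Str.strip l)) <;> simp

-- ===== VERDICT (by name: the statement is the Claim_ definition above) =====
theorem clean_lyrics_text_spec : Claim_equal_clean_lyrics_text := by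
  intro lyrics title _
  unfold Spec_clean_lyrics_text clean_lyrics_text clean_lyrics_text_alt
  rw [pvALoop_true]
  cases h : ((PySem.Str.split? lyrics "\n").getD []).findIdx?
      (fun l => pvIsStart title (PySem.Str.strip l)) with
  | none => simp; decide
  | some i => simp
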